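-- pv_equiv track=rewrite | github.com/tomtang110/comp9021 | week3/Lecture_3/three_special_perfect_squares_v3.py | encoding_if_ok
-- ===== SOURCE A (Python) =====
-- def encoding_if_ok(number, encoded_number):
--     while number:
--         # Extract rightmost digit, d, from number
--         digit = number % 10
--         # Check that that d is not encoded in encoded_number
--         if 1 << digit & encoded_number:
--             return
--         # Add encoding of d to encoded_number
--         encoded_number |= 1 << digit
--         # Get rid of d in number
--         number //= 10
--     return encoded_number
-- ===== SOURCE B (Python) =====
-- def encoding_if_ok(number, encoded_number):
--     # Phase 1: extract the digits of number (least significant first).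
--     digits = []
--     while number:
--         digits.append(number % 10)
--         number //= 10
--     # Phase 2: validate once — digits pairwise distinct, and their bit mask
--     # disjoint from encoded_number — then combine in a single OR.
--     if len(set(digits)) != len(digits):
--         return None
--     bits = 0
--     for d in digits:
--         bits |= 1 << d
--     if bits & encoded_number:
--         return None
--     return encoded_number | bits
-- ===== Notes on version B (the rewrite author's own statement) =====
-- stated objective: alternative
-- what changed: Two-phase decomposition: B first extracts the whole digit list, then validates distinctness with one set-size comparison and disjointness with one AND of a separately built mask, instead of A's per-digit test-and-set with early return inside the extraction loop.
-- outside the precondition, e.g. on encoding_if_ok(-7, 0): A returns None, B does not finish within the time limit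
import Mathlib
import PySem

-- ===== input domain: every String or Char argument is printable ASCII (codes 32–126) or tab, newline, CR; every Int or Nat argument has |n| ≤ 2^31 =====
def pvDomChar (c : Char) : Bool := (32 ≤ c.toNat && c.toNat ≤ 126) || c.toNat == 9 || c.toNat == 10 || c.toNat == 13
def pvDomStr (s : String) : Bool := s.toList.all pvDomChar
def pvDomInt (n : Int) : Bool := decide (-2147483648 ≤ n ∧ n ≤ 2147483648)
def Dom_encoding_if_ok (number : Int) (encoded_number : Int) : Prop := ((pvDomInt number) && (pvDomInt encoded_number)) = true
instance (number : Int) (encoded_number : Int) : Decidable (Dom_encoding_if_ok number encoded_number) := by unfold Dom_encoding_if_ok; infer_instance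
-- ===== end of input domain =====

-- B replaces A's per-digit test-and-set with a two-phase pass (extract all digits, then one
-- set-size distinctness check and one AND disjointness check); same cost, alternative structure.

-- used by the termination proofs of both ports (cited in 'decreasing_by')
theorem pv_floordiv10_toNat_lt (n : Int) (h : 0 < n) : (PySem.Int.floordiv n 10).toNat < n.toNat := by
  have h1 : n = ((n.toNat : Int)) := by omega
  have h2 : n.toNat / 10 < n.toNat := Nat.div_lt_self (by omega) (by norm_num)
  rw [h1, show ((10:Int)) = ((10:Nat):Int) from rfl, PySem.Int.floordiv_natCast]
  omega

-- ===== PORT A =====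
-- 'while number:' — the 'number < 0 → none' branch is a totality guard only: for negative
-- number Python's loop drives number to -1 and then extracts digit 9 forever, so the bit test
-- fires on (at latest) the second 9 and the Python function returns None on EVERY negative input.
def encoding_if_ok (number : Int) (encoded_number : Int) : Option Int :=
  if number = 0 then some encoded_number
  else if number < 0 then none
  else
    let digit := PySem.Int.mod number 10
    -- digit = number % 10 ∈ [0, 9]; '1 << digit' is (1 : Int) <<< digit.toNat (exact: digit ≥ 0)
    if PySem.Int.band ((1 <<< digit.toNat : Nat) : Int) encoded_number ≠ 0 then none
    else encoding_if_ok (PySem.Int.floordiv number 10)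
           (PySem.Int.bor encoded_number ((1 <<< digit.toNat : Nat) : Int))
termination_by number.toNat
decreasing_by
  rename_i h0 hneg
  exact pv_floordiv10_toNat_lt number (by omega)

-- ===== PORT B =====
-- 'while number: digits.append(number % 10); number //= 10' — the '≤ 0' guard makes the
-- recursion total; Python B never terminates on negative number (excluded by Pre_ below).
def pvDigits (number : Int) (digits : List Int) : List Int :=
  if number ≤ 0 then digits
  else pvDigits (PySem.Int.floordiv number 10) (digits ++ [PySem.Int.mod number 10])
termination_by number.toNat
decreasing_by
  rename_i hpos
  exact pv_floordiv10_toNat_lt number (by omega)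

def encoding_if_ok_alt (number : Int) (encoded_number : Int) : Option Int :=
  let digits := pvDigits number []
  if (PySem.Set.ofList digits).length ≠ digits.length then none
  else
    let bits := digits.foldl (fun b d => PySem.Int.bor b ((1 <<< d.toNat : Nat) : Int)) 0
    if PySem.Int.band bits encoded_number ≠ 0 then none
    else some (PySem.Int.bor encoded_number bits)

-- ===== PRECONDITION & SPEC =====
-- Pre_ excludes negative number: there Python A returns None only through the accident that
-- 'number //= 10' sticks at -1 and re-extracts digit 9 forever, while B's natural two-phase
-- extraction loop never terminates on negative input.
def Pre_encoding_if_ok (number : Int) (encoded_number : Int) : Prop := 0 ≤ number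
instance (number : Int) (encoded_number : Int) : Decidable (Pre_encoding_if_ok number encoded_number) := by unfold Pre_encoding_if_ok; infer_instance
def pvWitness_encoding_if_ok : Int × Int := (987, 5)

def Spec_encoding_if_ok (number : Int) (encoded_number : Int) (out : Option Int) : Prop := out = encoding_if_ok_alt number encoded_number
instance (number : Int) (encoded_number : Int) (out : Option Int) : Decidable (Spec_encoding_if_ok number encoded_number out) := by unfold Spec_encoding_if_ok; infer_instance

-- ===== CLAIM (what is proved, stated in full; the proofs are below) =====
def Claim_equal_encoding_if_ok : Prop := ∀ (number : Int) (encoded_number : Int), Dom_encoding_if_ok number encoded_number → Pre_encoding_if_ok number encoded_number → Spec_encoding_if_ok number encoded_number (encoding_if_ok number encoded_number)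

-- ===== LEMMAS AND PROOFS =====

-- Python's bit j of an arbitrary integer (two's complement with infinite sign extension).
def pvTb (e : Int) (j : Nat) : Bool := if 0 ≤ e then e.toNat.testBit j else !((-e - 1).toNat.testBit j)
theorem pv_nat_eq_zero_iff (a : Nat) : a = 0 ↔ ∀ j, a.testBit j = false :=
  ⟨fun h j => h ▸ Nat.zero_testBit j, Nat.zero_of_testBit_eq_false⟩
theorem pv_sub_and (a b : Nat) : a - (a &&& b) = a.ldiff b := by
  induction a using Nat.binaryRec generalizing b with
  | zero => simp [Nat.ldiff]
  | bit x a ih =>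
    rw [← Nat.bit_testBit_zero_shiftRight_one b, Nat.land_bit, Nat.ldiff_bit]
    have hle : a &&& b >>> 1 ≤ a := Nat.and_le_left
    have := ih (b >>> 1)
    rcases x <;> rcases hb : b.testBit 0 <;> simp [Nat.bit_val] <;> omega

theorem pv_band_natCast_eq_zero (m : Nat) (e : Int) :
    PySem.Int.band (↑m) e = 0 ↔ ∀ j, m.testBit j = true → pvTb e j = false := by
  by_cases he : 0 ≤ e
  · rw [PySem.Int.band_of_nonneg (by positivity) he]
    rw [show ((↑m : Int).toNat &&& e.toNat : Nat) = (m &&& e.toNat) by simp]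
    rw [show (((m &&& e.toNat : Nat) : Int) = 0 ↔ (m &&& e.toNat) = 0) by exact_mod_cast Iff.rfl]
    rw [pv_nat_eq_zero_iff]
    unfold pvTb
    simp [he]
  · rw [show PySem.Int.band (↑m) e = ↑((↑m : Int).toNat - ((↑m : Int).toNat &&& (-e - 1).toNat))
        by simp [PySem.Int.band, he]]
    rw [show ((↑m : Int).toNat = m) by simp, pv_sub_and]
    rw [show (((m.ldiff (-e-1).toNat : Nat) : Int) = 0 ↔ m.ldiff (-e-1).toNat = 0) by exact_mod_cast Iff.rfl]
    rw [pv_nat_eq_zero_iff]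
    unfold pvTb
    simp [he, Nat.testBit_ldiff]



theorem pv_neg_repr (e : Int) (he : ¬ 0 ≤ e) : e = -↑((-e - 1).toNat) - 1 := by omega

theorem pv_bor_neg (x m : Nat) : PySem.Int.bor (-(↑x) - 1) ↑m = -↑(x.ldiff m) - 1 := by
  have h1 : ¬ (0 : Int) ≤ -↑x - 1 := by omega
  have h2 : (-(-(↑x : Int) - 1) - 1) = (↑x : Int) := by ring
  simp only [PySem.Int.bor]
  rw [if_neg h1, if_pos (by positivity : (0 : Int) ≤ (↑m : Int))]
  rw [h2]
  simp [pv_sub_and]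

theorem pv_tb_neg (x : Nat) (j : Nat) : pvTb (-(↑x) - 1) j = !(x.testBit j) := by
  unfold pvTb
  rw [if_neg (by omega : ¬ (0 : Int) ≤ -↑x - 1)]
  rw [show (-(-(↑x : Int) - 1) - 1) = (↑x : Int) by ring]
  simp

theorem pv_tb_bor (e : Int) (m : Nat) (j : Nat) :
    pvTb (PySem.Int.bor e ↑m) j = (pvTb e j || m.testBit j) := by
  by_cases he : 0 ≤ e
  · rw [PySem.Int.bor_of_nonneg he (by positivity)]
    unfold pvTb
    simp [he]
  · rw [pv_neg_repr e he, pv_bor_neg, pv_tb_neg, pv_tb_neg, Nat.testBit_ldiff]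
    rcases (-e - 1).toNat.testBit j <;> rcases m.testBit j <;> rfl

theorem pv_bor_bor (e : Int) (m m' : Nat) :
    PySem.Int.bor (PySem.Int.bor e ↑m) ↑m' = PySem.Int.bor e ↑(m ||| m') := by
  by_cases he : 0 ≤ e
  · rw [show e = ((e.toNat : Nat) : Int) by omega, PySem.Int.bor_natCast, PySem.Int.bor_natCast,
       PySem.Int.bor_natCast, Nat.lor_assoc]
  · rw [pv_neg_repr e he, pv_bor_neg, pv_bor_neg, pv_bor_neg]
    congr 2
    norm_cast
    apply Nat.eq_of_testBit_eq
    intro i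
    simp only [Nat.testBit_ldiff, Nat.testBit_lor]
    rcases (-e - 1).toNat.testBit i <;> rcases m.testBit i <;> rcases m'.testBit i <;> rfl

theorem pv_band_pow (k : Nat) (e : Int) :
    PySem.Int.band ((1 <<< k : Nat) : Int) e = 0 ↔ pvTb e k = false := by
  rw [pv_band_natCast_eq_zero]
  simp only [Nat.one_shiftLeft, Nat.testBit_two_pow, decide_eq_true_eq]
  exact ⟨fun h => h k rfl, fun h j hj => hj ▸ h⟩

-- The digit list of n (least significant first), the common spec of both loops.
def pvDigs (n : Int) : List Int :=
  if n ≤ 0 then []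
  else PySem.Int.mod n 10 :: pvDigs (PySem.Int.floordiv n 10)
termination_by n.toNat
decreasing_by
  rename_i hpos
  exact pv_floordiv10_toNat_lt n (by omega)

def pvMask : List Int → Nat
  | [] => 0
  | d :: ds => (1 <<< d.toNat) ||| pvMask ds

theorem pv_mask_testBit (ds : List Int) (j : Nat) :
    (pvMask ds).testBit j = true ↔ ∃ d ∈ ds, d.toNat = j := by
  induction ds with
  | nil => simp [pvMask]
  | cons d ds ih =>
    simp only [pvMask, Nat.testBit_lor, Nat.one_shiftLeft, Nat.testBit_two_pow,
      Bool.or_eq_true, decide_eq_true_eq, ih, List.mem_cons]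
    constructor
    · rintro (h | ⟨d', hd', rfl⟩)
      · exact ⟨d, Or.inl rfl, h⟩
      · exact ⟨d', Or.inr hd', rfl⟩
    · rintro ⟨d', (rfl | hd'), rfl⟩
      · exact Or.inl rfl
      · exact Or.inr ⟨d', hd', rfl⟩

theorem pv_digs_mem (n : Int) (d : Int) (h : d ∈ pvDigs n) : 0 ≤ d ∧ d < 10 := by
  fun_induction pvDigs n with
  | case1 n hle => simp at h
  | case2 n hle ih =>
    rcases List.mem_cons.mp h with h1 | h2
    · subst h1
      exact ⟨PySem.Int.mod_nonneg _ (by omega), PySem.Int.mod_lt _ (by omega)⟩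
    · exact ih h2

theorem pv_digs_cons (n : Int) (h : 0 < n) :
    pvDigs n = PySem.Int.mod n 10 :: pvDigs (PySem.Int.floordiv n 10) := by
  rw [pvDigs]; simp [not_le.mpr h]

theorem pvDigits_eq (n : Int) (acc : List Int) : pvDigits n acc = acc ++ pvDigs n := by
  fun_induction pvDigits n acc with
  | case1 n acc h => rw [pvDigs]; simp [h]
  | case2 n acc h ih => rw [ih, pv_digs_cons n (by omega)]; simp

theorem pv_a_char (n : Int) (e : Int) (hn : 0 ≤ n) :
    encoding_if_ok n e =
      if (pvDigs n).Nodup ∧ (∀ d ∈ pvDigs n, pvTb e d.toNat = false)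
      then some (PySem.Int.bor e ↑(pvMask (pvDigs n))) else none := by
  revert hn
  fun_induction encoding_if_ok n e with
  | case1 e =>
    intro hn
    rw [pvDigs]
    simp [pvMask, PySem.Int.bor_zero]
  | case2 n e h0 hneg =>
    intro hn; omega
  | case3 n e h0 hneg dg hband =>
    intro hn
    rw [pv_digs_cons n (by omega), if_neg]
    rintro ⟨-, hall⟩
    have htb := hall (PySem.Int.mod n 10) List.mem_cons_self
    exact hband ((pv_band_pow _ e).mpr htb)
  | case4 n e h0 hneg dg hband ih =>
    intro hn
    have hpos : (0 : Int) < n := by omega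
    have hdiv : (0 : Int) ≤ PySem.Int.floordiv n 10 := by
      rw [PySem.Int.floordiv_eq_ediv_of_pos (by omega : (0:Int) < 10)]
      exact Int.ediv_nonneg (by omega) (by omega)
    rw [ih hdiv, pv_digs_cons n hpos]
    have hd0 : 0 ≤ dg := PySem.Int.mod_nonneg _ (by omega)
    have htb : pvTb e dg.toNat = false := by
      rw [← pv_band_pow]
      simpa using hband
    have hcond : ((pvDigs (PySem.Int.floordiv n 10)).Nodup ∧
          ∀ d' ∈ pvDigs (PySem.Int.floordiv n 10),
            pvTb (PySem.Int.bor e ↑(1 <<< dg.toNat)) d'.toNat = false)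
        ↔ ((dg :: pvDigs (PySem.Int.floordiv n 10)).Nodup ∧
          ∀ d' ∈ dg :: pvDigs (PySem.Int.floordiv n 10), pvTb e d'.toNat = false) := by
      simp only [List.nodup_cons, List.mem_cons, forall_eq_or_imp]
      constructor
      · rintro ⟨hnd, hall⟩
        refine ⟨⟨fun hmem => ?_, hnd⟩, htb, fun d' hd' => ?_⟩
        · have := hall dg hmem
          rw [pv_tb_bor] at this
          simp [Nat.one_shiftLeft] at this
        · have := hall d' hd'
          rw [pv_tb_bor] at this
          exact (Bool.or_eq_false_iff.mp this).1
      · rintro ⟨⟨hmem, hnd⟩, -, hall⟩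
        refine ⟨hnd, fun d' hd' => ?_⟩
        rw [pv_tb_bor, Bool.or_eq_false_iff]
        refine ⟨hall d' hd', ?_⟩
        have hne : dg ≠ d' := by rintro rfl; exact hmem hd'
        have hb' := pv_digs_mem _ _ hd'
        have hne' : dg.toNat ≠ d'.toNat := by omega
        simp [Nat.one_shiftLeft, hne']
    by_cases hC : (dg :: pvDigs (PySem.Int.floordiv n 10)).Nodup ∧
        ∀ d' ∈ dg :: pvDigs (PySem.Int.floordiv n 10), pvTb e d'.toNat = false
    · rw [if_pos (hcond.mpr hC), if_pos hC, pv_bor_bor, pvMask]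
    · rw [if_neg (fun h => hC (hcond.mp h)), if_neg hC]

theorem pv_setlen (l : List Int) : (PySem.Set.ofList l).length = l.length ↔ l.Nodup := by
  induction l with
  | nil => simp [PySem.Set.ofList_nil]
  | cons x l ih =>
    rw [PySem.Set.ofList_cons]
    by_cases hx : x ∈ l
    · have hmem : x ∈ PySem.Set.ofList l := (PySem.Set.mem_ofList l x).mpr hx
      have hlt : ((PySem.Set.ofList l).discard x).length < (PySem.Set.ofList l).length := by
        show ((PySem.Set.ofList l).filter _).length < _
        rw [List.length_filter_lt_length_iff_exists]
        exact ⟨x, hmem, by simp⟩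
      have hle := PySem.Set.length_ofList_le l
      simp only [List.length_cons, List.nodup_cons]
      constructor
      · intro h; omega
      · rintro ⟨hxl, -⟩; exact absurd hx hxl
    · have heq : (PySem.Set.ofList l).discard x = PySem.Set.ofList l := by
        apply List.filter_eq_self.mpr
        intro y hy
        have hyl : y ∈ l := (PySem.Set.mem_ofList l y).mp hy
        have hne : y ≠ x := by rintro rfl; exact hx hyl
        simp [hne]
      rw [heq]
      simp only [List.length_cons, List.nodup_cons]
      constructor
      · intro h; exact ⟨hx, ih.mp (by omega)⟩
      · rintro ⟨-, hnd⟩; rw [ih.mpr hnd]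

theorem pv_bits_eq (ds : List Int) (m : Nat) :
    ds.foldl (fun b d => PySem.Int.bor b ((1 <<< d.toNat : Nat) : Int)) ↑m = ↑(m ||| pvMask ds) := by
  induction ds generalizing m with
  | nil => simp [pvMask]
  | cons d ds ih =>
    rw [List.foldl_cons, PySem.Int.bor_natCast, ih, pvMask, Nat.lor_assoc]

theorem pv_band_mask (ds : List Int) (e : Int) :
    PySem.Int.band ↑(pvMask ds) e = 0 ↔ ∀ d ∈ ds, pvTb e d.toNat = false := by
  rw [pv_band_natCast_eq_zero]
  constructor
  · intro h d hd
    exact h d.toNat ((pv_mask_testBit ds d.toNat).mpr ⟨d, hd, rfl⟩)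
  · intro h j hj
    obtain ⟨d, hd, rfl⟩ := (pv_mask_testBit ds j).mp hj
    exact h d hd

theorem pv_bits_eq0 (ds : List Int) :
    ds.foldl (fun b d => PySem.Int.bor b ((1 <<< d.toNat : Nat) : Int)) 0 = ↑(pvMask ds) := by
  simpa using pv_bits_eq ds 0

theorem pv_b_char (n : Int) (e : Int) (hn : 0 ≤ n) :
    encoding_if_ok_alt n e =
      if (pvDigs n).Nodup ∧ (∀ d ∈ pvDigs n, pvTb e d.toNat = false)
      then some (PySem.Int.bor e ↑(pvMask (pvDigs n))) else none := by
  simp only [encoding_if_ok_alt]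
  rw [pvDigits_eq n [], List.nil_append, pv_bits_eq0]
  by_cases hnd : (pvDigs n).Nodup
  · rw [if_neg (by simp only [ne_eq, not_not, pv_setlen]; exact hnd)]
    by_cases hall : ∀ d ∈ pvDigs n, pvTb e d.toNat = false
    · rw [if_neg (by simp only [ne_eq, not_not]; exact (pv_band_mask _ e).mpr hall),
          if_pos ⟨hnd, hall⟩, PySem.Int.bor_comm]
    · rw [if_pos (by simp only [ne_eq, pv_band_mask]; exact hall),
          if_neg (by rintro ⟨-, h⟩; exact hall h)]
  · rw [if_pos (by simp only [ne_eq, pv_setlen]; exact hnd),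
        if_neg (by rintro ⟨h, -⟩; exact hnd h)]

-- ===== VERDICT (by name: the statement is the Claim_ definition above) =====
theorem encoding_if_ok_spec : Claim_equal_encoding_if_ok := by
  intro number encoded_number _ hpre
  unfold Spec_encoding_if_ok
  rw [pv_a_char number encoded_number hpre, pv_b_char number encoded_number hpre]
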